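-- pv_equiv track=rewrite | github.com/ameliebm/DL_Exercise_04_ModalReasoner | tableux.py | generate_formula_series_2
-- ===== SOURCE A (Python) =====
-- def generate_formula_series_2(n):
--     ret = ["p0"]
--     for i in range(1, n+1):
--         phi = ret[-1] + "&" \
--         + ('_' * (i-1)) \
--         + "not(p" + str(i-1) + "&" \
--         + "not(" \
--         + "not(_not(p" + str(i) + "& q" + str(i) + "))" + "&"\
--         + "not(_not(p" + str(i) + "& not(q" + str(i) + ")))" + "&" \
--         + "))"
--         ret.append(phi)
--     return ret
-- ===== SOURCE B (Python) =====
-- def _suffix(i):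
--     return f"&{'_' * (i - 1)}not(p{i - 1}&not(not(_not(p{i}& q{i}))&not(_not(p{i}& not(q{i})))&))"
--
--
-- def generate_formula_series_2(n):
--     parts = ["p0"] + [_suffix(i) for i in range(1, n + 1)]
--     return ["".join(parts[:k + 1]) for k in range(len(parts))]
-- ===== Notes on version B (the rewrite author's own statement) =====
-- stated objective: alternative
-- what changed: B first builds the list of per-index suffix pieces, then produces each output as the join of a prefix of that list, replacing A's running accumulator that appends to ret and re-reads ret[-1].
import Mathlib
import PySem

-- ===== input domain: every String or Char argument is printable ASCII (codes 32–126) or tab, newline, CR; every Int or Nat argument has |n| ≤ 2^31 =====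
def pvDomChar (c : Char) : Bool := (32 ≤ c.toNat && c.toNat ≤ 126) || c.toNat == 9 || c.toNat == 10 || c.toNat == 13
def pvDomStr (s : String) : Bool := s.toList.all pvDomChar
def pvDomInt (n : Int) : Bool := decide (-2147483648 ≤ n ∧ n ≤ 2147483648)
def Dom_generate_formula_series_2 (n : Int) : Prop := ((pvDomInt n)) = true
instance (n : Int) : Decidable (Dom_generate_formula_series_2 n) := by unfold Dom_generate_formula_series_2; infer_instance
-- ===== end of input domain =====

-- B separates suffix generation from the cumulative pass: it builds the list of per-step
-- suffix pieces first and then emits each output string as the join of a prefix of that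
-- list, instead of A's running accumulator read back through ret[-1] (objective: alternative).

-- ===== PORT A =====
def generate_formula_series_2 (n : Int) : List String :=
  (PySem.List.pyRange 1 (n + 1) 1).foldl
    (fun ret i =>
      -- ret[-1] always exists here (ret starts nonempty and only grows); getD "" is a totality guard
      let phi := PySem.List.pyGetD ret (-1) "" ++ "&"
        ++ String.ofList (PySem.List.pyRepeat ['_'] (i - 1))
        ++ "not(p" ++ PySem.Int.toStr (i - 1) ++ "&"
        ++ "not("
        ++ "not(_not(p" ++ PySem.Int.toStr i ++ "& q" ++ PySem.Int.toStr i ++ "))" ++ "&"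
        ++ "not(_not(p" ++ PySem.Int.toStr i ++ "& not(q" ++ PySem.Int.toStr i ++ ")))" ++ "&"
        ++ "))"
      ret ++ [phi])
    ["p0"]

-- ===== PORT B =====
def pvSuffix (i : Int) : String :=
  "&" ++ String.ofList (PySem.List.pyRepeat ['_'] (i - 1))
    ++ "not(p" ++ PySem.Int.toStr (i - 1) ++ "&not(not(_not(p"
    ++ PySem.Int.toStr i ++ "& q" ++ PySem.Int.toStr i ++ "))&not(_not(p"
    ++ PySem.Int.toStr i ++ "& not(q" ++ PySem.Int.toStr i ++ ")))&))"

def generate_formula_series_2_alt (n : Int) : List String :=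
  let parts := "p0" :: (PySem.List.pyRange 1 (n + 1) 1).map pvSuffix
  (PySem.List.pyRange 0 (parts.length : Int) 1).map
    (fun k => PySem.Str.join "" (PySem.List.slice parts none (some (k + 1))))

-- ===== PRECONDITION & SPEC =====
def Spec_generate_formula_series_2 (n : Int) (out : List String) : Prop := out = generate_formula_series_2_alt n
instance (n : Int) (out : List String) : Decidable (Spec_generate_formula_series_2 n out) := by unfold Spec_generate_formula_series_2; infer_instance

-- ===== CLAIM (what is proved, stated in full; the proofs are below) =====
def Claim_equal_generate_formula_series_2 : Prop := ∀ (n : Int), Dom_generate_formula_series_2 n → Spec_generate_formula_series_2 n (generate_formula_series_2 n)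

-- ===== LEMMAS AND PROOFS =====

-- the cumulative formula after k steps
def pvCum : Nat → String
  | 0 => "p0"
  | k + 1 => pvCum k ++ pvSuffix ((k : Int) + 1)

lemma pv_intercalate_nil (ls : List (List Char)) : ([] : List Char).intercalate ls = ls.flatten := by
  induction ls with
  | nil => simp [List.intercalate]
  | cons a l ih => cases l <;> simp_all [List.intercalate, List.intersperse]

lemma pv_join_concat (xs : List String) (x : String) :
    PySem.Str.join "" (xs ++ [x]) = PySem.Str.join "" xs ++ x := by
  simp [PySem.Str.join, PySem.Chars.join, pv_intercalate_nil, String.ofList_append]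

lemma pv_phiA (s : String) (i : Int) :
    s ++ "&"
      ++ String.ofList (PySem.List.pyRepeat ['_'] (i - 1))
      ++ "not(p" ++ PySem.Int.toStr (i - 1) ++ "&"
      ++ "not("
      ++ "not(_not(p" ++ PySem.Int.toStr i ++ "& q" ++ PySem.Int.toStr i ++ "))" ++ "&"
      ++ "not(_not(p" ++ PySem.Int.toStr i ++ "& not(q" ++ PySem.Int.toStr i ++ ")))" ++ "&"
      ++ "))" = s ++ pvSuffix i := by
  have h1 : ("&not(not(_not(p" : String).toList = "&".toList ++ "not(".toList ++ "not(_not(p".toList := by decide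
  have h2 : ("))&not(_not(p" : String).toList = "))".toList ++ "&".toList ++ "not(_not(p".toList := by decide
  have h3 : (")))&))" : String).toList = ")))".toList ++ "&".toList ++ "))".toList := by decide
  have key : (s ++ "&"
      ++ String.ofList (PySem.List.pyRepeat ['_'] (i - 1))
      ++ "not(p" ++ PySem.Int.toStr (i - 1) ++ "&"
      ++ "not("
      ++ "not(_not(p" ++ PySem.Int.toStr i ++ "& q" ++ PySem.Int.toStr i ++ "))" ++ "&"
      ++ "not(_not(p" ++ PySem.Int.toStr i ++ "& not(q" ++ PySem.Int.toStr i ++ ")))" ++ "&"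
      ++ "))").toList = (s ++ pvSuffix i).toList := by
    simp [pvSuffix, String.toList_append, h1, h2, h3]
  calc _ = String.ofList ((s ++ "&"
      ++ String.ofList (PySem.List.pyRepeat ['_'] (i - 1))
      ++ "not(p" ++ PySem.Int.toStr (i - 1) ++ "&"
      ++ "not("
      ++ "not(_not(p" ++ PySem.Int.toStr i ++ "& q" ++ PySem.Int.toStr i ++ "))" ++ "&"
      ++ "not(_not(p" ++ PySem.Int.toStr i ++ "& not(q" ++ PySem.Int.toStr i ++ ")))" ++ "&"
      ++ "))").toList) := String.ofList_toList.symm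
    _ = String.ofList ((s ++ pvSuffix i).toList) := by rw [key]
    _ = s ++ pvSuffix i := String.ofList_toList

lemma pv_A_loop (m : Nat) :
    ((List.range m).map (fun k : Nat => (1 : Int) + k)).foldl
      (fun ret i => ret ++ [PySem.List.pyGetD ret (-1) "" ++ pvSuffix i]) ["p0"]
      = (List.range (m + 1)).map pvCum := by
  induction m with
  | zero => simp [List.range_succ, pvCum]
  | succ m ih =>
    rw [List.range_succ (n := m + 1), List.range_succ (n := m)]
    simp only [List.map_append, List.foldl_append, ih, List.map_cons, List.map_nil, List.foldl_cons,
      List.foldl_nil]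
    have hlast : PySem.List.pyGetD ((List.range (m + 1)).map pvCum) (-1) "" = pvCum m := by
      rw [List.range_succ, List.map_append]
      exact PySem.List.pyGetD_neg_one_append_singleton _ _ _
    rw [hlast]
    have : ((1 : Int) + (m : Int)) = ((m : Int) + 1) := by omega
    rw [this, List.range_succ (n := m)]
    simp [pvCum]

lemma pv_A_eq (m : Nat) :
    generate_formula_series_2 (m : Int) = (List.range (m + 1)).map pvCum := by
  unfold generate_formula_series_2
  have hr : PySem.List.pyRange 1 ((m : Int) + 1) 1
      = (List.range m).map (fun k : Nat => (1 : Int) + k) := by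
    rw [PySem.List.pyRange_one]; simp
  rw [hr]
  rw [show (fun (ret : List String) (i : Int) =>
      let phi := PySem.List.pyGetD ret (-1) "" ++ "&"
        ++ String.ofList (PySem.List.pyRepeat ['_'] (i - 1))
        ++ "not(p" ++ PySem.Int.toStr (i - 1) ++ "&"
        ++ "not("
        ++ "not(_not(p" ++ PySem.Int.toStr i ++ "& q" ++ PySem.Int.toStr i ++ "))" ++ "&"
        ++ "not(_not(p" ++ PySem.Int.toStr i ++ "& not(q" ++ PySem.Int.toStr i ++ ")))" ++ "&"
        ++ "))"
      ret ++ [phi])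
      = fun ret i => ret ++ [PySem.List.pyGetD ret (-1) "" ++ pvSuffix i] by
    funext ret i
    simp only
    rw [pv_phiA]]
  exact pv_A_loop m

lemma pv_join_prefix (m k : Nat) (hk : k ≤ m) :
    PySem.Str.join "" (List.take (k + 1)
        ("p0" :: (List.range m).map (fun j : Nat => pvSuffix ((1 : Int) + j)))) = pvCum k := by
  induction k with
  | zero => simp only [List.take_succ_cons, List.take_zero]; decide
  | succ k ih =>
    have hmk : k ≤ m := by omega
    have h1 : List.take (k + 1 + 1) ("p0" :: (List.range m).map (fun j : Nat => pvSuffix ((1 : Int) + j)))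
        = (List.take (k + 1) ("p0" :: (List.range m).map (fun j : Nat => pvSuffix ((1 : Int) + j))))
          ++ [pvSuffix ((1 : Int) + k)] := by
      simp only [List.take_succ_cons, ← List.map_take, List.take_range]
      rw [Nat.min_eq_left hk, Nat.min_eq_left hmk, List.range_succ]
      simp
    rw [h1, pv_join_concat, ih hmk]
    have hc : ((1 : Int) + k) = ((k : Int) + 1) := by omega
    rw [hc]
    rfl

lemma pv_B_eq (m : Nat) :
    generate_formula_series_2_alt (m : Int) = (List.range (m + 1)).map pvCum := by
  unfold generate_formula_series_2_alt
  have hr : PySem.List.pyRange 1 ((m : Int) + 1) 1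
      = (List.range m).map (fun k : Nat => (1 : Int) + k) := by
    rw [PySem.List.pyRange_one]; simp
  rw [hr]
  simp only [List.length_cons, List.length_map, List.length_range]
  rw [show ((m + 1 : Nat) : Int) = ((m + 1 : Nat) : Int) from rfl, PySem.List.pyRange_zero_nat,
    List.map_map]
  apply List.map_congr_left
  intro k hk
  rw [List.mem_range] at hk
  simp only [Function.comp]
  rw [show ((k : Int) + 1) = ((k + 1 : Nat) : Int) by push_cast; ring,
    PySem.List.slice_to_natCast]
  rw [List.map_map] at *
  exact pv_join_prefix m k (by omega)

-- ===== VERDICT (by name: the statement is the Claim_ definition above) =====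
theorem generate_formula_series_2_spec : Claim_equal_generate_formula_series_2 := by
  intro n _
  unfold Spec_generate_formula_series_2
  have hr : PySem.List.pyRange 1 (n + 1) 1 = PySem.List.pyRange 1 ((n.toNat : Int) + 1) 1 := by
    rw [PySem.List.pyRange_one, PySem.List.pyRange_one]
    have h2 : ((n.toNat : Int) + 1 - 1).toNat = (n + 1 - 1).toNat := by omega
    rw [h2]
  have hA : generate_formula_series_2 n = generate_formula_series_2 (n.toNat : Int) := by
    unfold generate_formula_series_2; rw [hr]
  have hB : generate_formula_series_2_alt n = generate_formula_series_2_alt (n.toNat : Int) := by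
    unfold generate_formula_series_2_alt; rw [hr]
  rw [hA, hB, pv_A_eq, pv_B_eq]
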